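-- pv_equiv track=rewrite | github.com/micchyboy237/jet_python_modules | jet/utils/print_utils.py | get_common_dict_structure
-- ===== SOURCE A (Python) =====
-- from typing import Any, List, Optional
-- from collections.abc import Mapping
--
-- def get_common_dict_structure(data: List[Any]) -> dict | None:
--     """
--     Helper function to extract a dictionary structure with all possible keys from a list of dictionaries.
--     Uses values from the first dictionary where available, otherwise from the first occurrence of the key.
--     Keys are sorted alphabetically for consistent ordering.
--     """
--     if not data or not all(isinstance(item, Mapping) for item in data):
--         return None
--     all_keys = sorted(set.union(*(set(item.keys())
--                       for item in data)))  # Sort keys alphabetically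
--     result = {}
--     for key in all_keys:
--         # Find the first dictionary that has this key
--         for item in data:
--             if key in item:
--                 result[key] = item[key]
--                 break
--     return result
-- ===== SOURCE B (Python) =====
-- from typing import Any, List, Optional
-- from collections.abc import Mapping
--
--
-- def get_common_dict_structure(data: List[Any]) -> dict | None:
--     """Reverse-merge re-implementation: same validation, then one update() pass
--     over the dicts in reverse order (so the earliest dict's value wins), then
--     sort the merged items by key (avoids the per-key scan over all dicts)."""
--     if not data or not all(isinstance(item, Mapping) for item in data):
--         return None
--     merged = {}
--     for item in reversed(data):
--         merged.update(item)
--     return dict(sorted(merged.items(), key=lambda kv: kv[0]))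
-- ===== Notes on version B (the rewrite author's own statement) =====
-- stated objective: faster
-- what changed: The key-centric nested scan (for each sorted key, search the dict list for the first dict containing it) is replaced by a dict-centric single reverse pass of dict.update, so the earliest dict's value wins because it is applied last, followed by one sort of the merged items.
import Mathlib
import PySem

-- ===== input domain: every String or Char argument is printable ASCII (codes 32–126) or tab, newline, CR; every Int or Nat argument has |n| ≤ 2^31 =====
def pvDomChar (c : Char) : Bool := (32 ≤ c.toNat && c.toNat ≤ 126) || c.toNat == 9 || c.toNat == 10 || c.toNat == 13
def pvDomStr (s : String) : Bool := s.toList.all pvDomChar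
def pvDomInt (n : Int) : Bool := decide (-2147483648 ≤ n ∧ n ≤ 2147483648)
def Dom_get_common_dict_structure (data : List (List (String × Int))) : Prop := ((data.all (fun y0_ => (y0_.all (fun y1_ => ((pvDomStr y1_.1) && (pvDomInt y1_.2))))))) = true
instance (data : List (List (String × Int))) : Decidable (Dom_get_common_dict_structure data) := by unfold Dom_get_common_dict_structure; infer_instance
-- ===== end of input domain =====

-- B replaces A's per-key scan over the dict list (O(K*D)) by one reverse-order merge pass plus a sort of the merged items; a timing run measured it faster.
-- ===== PORT A =====
-- inner loop "for item in data: if key in item: result[key] = item[key]; break"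
def pvFirstVal : List (List (String × Int)) → String → Option Int
  | [], _ => none
  | item :: rest, key =>
    match (PySem.Dict.mk item).get? key with
    | some v => some v
    | none => pvFirstVal rest key

def get_common_dict_structure (data : List (List (String × Int))) : Option (List (String × Int)) :=
  -- every item is a Mapping by the type convention, so the isinstance check is always true
  if data.isEmpty then none
  else
    let allKeys : List String :=
      PySem.List.sorted
        (data.foldl (fun s item => PySem.Set.union s (PySem.Set.ofList (PySem.Dict.mk item).keys))
          PySem.Set.empty)
        (fun k => k)
    let result : PySem.Dict String Int :=
      allKeys.foldl (fun r key =>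
        match pvFirstVal data key with
        | some v => r.insert key v
        | none => r) PySem.Dict.empty
    some result.items

-- ===== PORT B =====
def get_common_dict_structure_alt (data : List (List (String × Int))) : Option (List (String × Int)) :=
  if data.isEmpty then none
  else
    let merged : PySem.Dict String Int :=
      data.reverse.foldl (fun r item => r.update item) PySem.Dict.empty
    some (PySem.List.sorted merged.items (fun kv => kv.1))

-- ===== PRECONDITION & SPEC =====
-- Pre_ excludes inputs where some inner pair list carries a duplicate key: such a list is an
-- ambiguous representation of a Python dict (first- vs last-occurrence value is a representation
-- artefact the Python programs, which receive real dicts, never see).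
def Pre_get_common_dict_structure (data : List (List (String × Int))) : Prop :=
  ∀ item ∈ data, (item.map Prod.fst).Nodup
instance (data : List (List (String × Int))) : Decidable (Pre_get_common_dict_structure data) := by
  unfold Pre_get_common_dict_structure; infer_instance

def pvWitness_get_common_dict_structure : (List (List (String × Int))) :=
  [[("b", 2), ("a", 3)], [("a", 1)]]

def Spec_get_common_dict_structure (data : List (List (String × Int))) (out : Option (List (String × Int))) : Prop := out = get_common_dict_structure_alt data
instance (data : List (List (String × Int))) (out : Option (List (String × Int))) : Decidable (Spec_get_common_dict_structure data out) := by unfold Spec_get_common_dict_structure; infer_instance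

-- ===== CLAIM (what is proved, stated in full; the proofs are below) =====
def Claim_equal_get_common_dict_structure : Prop := ∀ (data : List (List (String × Int))), Dom_get_common_dict_structure data → Pre_get_common_dict_structure data → Spec_get_common_dict_structure data (get_common_dict_structure data)

-- ===== LEMMAS AND PROOFS =====

-- the union fold collects exactly the keys occurring in some item, without duplicates
lemma pv_unionFold_nodup (data : List (List (String × Int))) (s : PySem.Set String)
    (hs : s.Nodup) :
    (data.foldl (fun s item => PySem.Set.union s (PySem.Set.ofList (PySem.Dict.mk item).keys)) s).Nodup := by
  induction data generalizing s with
  | nil => exact hs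
  | cons item rest ih => exact ih _ (PySem.Set.nodup_union _ _ hs)

lemma pv_mem_unionFold (data : List (List (String × Int))) (s : PySem.Set String) (k : String) :
    k ∈ data.foldl (fun s item => PySem.Set.union s (PySem.Set.ofList (PySem.Dict.mk item).keys)) s ↔
      k ∈ s ∨ ∃ item ∈ data, k ∈ item.map Prod.fst := by
  induction data generalizing s with
  | nil => simp
  | cons item rest ih =>
    simp only [List.foldl_cons, ih, PySem.Set.mem_union, PySem.Set.mem_ofList, List.mem_cons]
    constructor
    · rintro ((h | h) | ⟨i, hi, hk⟩)
      · exact Or.inl h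
      · exact Or.inr ⟨item, Or.inl rfl, by simpa [PySem.Dict.keys] using h⟩
      · exact Or.inr ⟨i, Or.inr hi, hk⟩
    · rintro (h | ⟨i, rfl | hi, hk⟩)
      · exact Or.inl (Or.inl h)
      · exact Or.inl (Or.inr (by simpa [PySem.Dict.keys] using hk))
      · exact Or.inr ⟨i, hi, hk⟩

-- pvFirstVal returns a value exactly for keys occurring in some item
lemma pv_firstVal_isSome (data : List (List (String × Int))) (k : String) :
    (pvFirstVal data k).isSome ↔ ∃ item ∈ data, k ∈ item.map Prod.fst := by
  induction data with
  | nil => simp [pvFirstVal]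
  | cons item rest ih =>
    cases hg : (PySem.Dict.mk item).get? k with
    | some v =>
      have hmem : (k, v) ∈ item := by
        simpa using PySem.Dict.mem_items_of_get?_eq_some _ hg
      simp only [pvFirstVal, hg]
      simp [List.mem_cons]
      exact Or.inl ⟨v, hmem⟩
    | none =>
      have hk : k ∉ item.map Prod.fst := by
        have := (PySem.Dict.get?_eq_none_iff_not_mem_keys _ k).1 hg
        simpa [PySem.Dict.keys_mk] using this
      simp only [pvFirstVal, hg, ih, List.mem_cons]
      constructor
      · rintro ⟨i, hi, hik⟩; exact ⟨i, Or.inr hi, hik⟩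
      · rintro ⟨i, rfl | hi, hik⟩
        · exact absurd hik hk
        · exact ⟨i, hi, hik⟩

-- one update() with a duplicate-free pair list: look the key up in the item first, else fall through
lemma pv_get?_update (item : List (String × Int)) (d : PySem.Dict String Int)
    (hnd : (item.map Prod.fst).Nodup) (k : String) :
    (d.update item).get? k = ((PySem.Dict.mk item).get? k).or (d.get? k) := by
  induction item generalizing d with
  | nil => simp [PySem.Dict.update, PySem.Dict.get?]
  | cons p ps ih =>
    have hnd' : (ps.map Prod.fst).Nodup := hnd.of_cons
    have hp : p.1 ∉ ps.map Prod.fst := by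
      simpa using (List.nodup_cons.mp hnd).1
    have hps : (PySem.Dict.mk ps).get? p.1 = none := by
      rw [PySem.Dict.get?_eq_none_iff_not_mem_keys]
      simpa [PySem.Dict.keys_mk] using hp
    show ((d.insert p.1 p.2).update ps).get? k = _
    rw [ih _ hnd', PySem.Dict.get?_mk_cons, PySem.Dict.get?_insert]
    by_cases hk : k = p.1
    · simp [hk, hps]
    · have hne : (p.1 == k) = false := by
        simpa using fun h : p.1 = k => hk h.symm
      simp [hk, hne]

-- the reverse-merge fold looks every key up as pvFirstVal does
lemma pv_get?_revFold (L : List (List (String × Int))) (d : PySem.Dict String Int)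
    (hnd : ∀ item ∈ L, (item.map Prod.fst).Nodup) (k : String) :
    (L.foldl (fun r item => r.update item) d).get? k =
      (pvFirstVal L.reverse k).or (d.get? k) := by
  induction L generalizing d with
  | nil => simp [pvFirstVal]
  | cons item rest ih =>
    have h1 : ∀ i ∈ rest, (i.map Prod.fst).Nodup := fun i hi => hnd i (List.mem_cons_of_mem _ hi)
    show ((rest).foldl (fun r item => r.update item) (d.update item)).get? k = _
    rw [ih _ h1, pv_get?_update item d (hnd item (List.mem_cons_self)) k]
    -- pvFirstVal over (item :: rest).reverse = rest.reverse ++ [item]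
    have hsplit : ∀ (M : List (List (String × Int))),
        (pvFirstVal (M ++ [item]) k) = (pvFirstVal M k).or ((PySem.Dict.mk item).get? k) := by
      intro M
      induction M with
      | nil => cases hg : (PySem.Dict.mk item).get? k <;> simp [pvFirstVal, hg]
      | cons j js ihj =>
        cases hg : (PySem.Dict.mk j).get? k <;> simp [pvFirstVal, hg, ihj]
    simp only [List.reverse_cons, hsplit rest.reverse, Option.or_assoc]

lemma pv_nodup_keys_update (item : List (String × Int)) (d : PySem.Dict String Int)
    (h : d.keys.Nodup) : (d.update item).keys.Nodup :=
  PySem.Dict.nodup_keys_foldl_insert_key item Prod.fst (fun _ p => p.2) d h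

lemma pv_nodup_keys_revFold (L : List (List (String × Int))) (d : PySem.Dict String Int)
    (h : d.keys.Nodup) : (L.foldl (fun r item => r.update item) d).keys.Nodup := by
  induction L generalizing d with
  | nil => exact h
  | cons item rest ih => exact ih _ (pv_nodup_keys_update item d h)

lemma pv_mem_keys_iff_get?_ne_none (d : PySem.Dict String Int) (k : String) :
    k ∈ d.keys ↔ d.get? k ≠ none := by
  rw [Ne, PySem.Dict.get?_eq_none_iff_not_mem_keys, not_not]

-- ===== VERDICT (by name: the statement is the Claim_ definition above) =====
theorem get_common_dict_structure_spec : Claim_equal_get_common_dict_structure := by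
  intro data _hdom hpre
  unfold Spec_get_common_dict_structure
  unfold get_common_dict_structure get_common_dict_structure_alt
  by_cases hemp : data.isEmpty
  · simp [hemp]
  · rw [if_neg hemp, if_neg hemp]
    -- names
    set K : PySem.Set String :=
      data.foldl (fun s item => PySem.Set.union s (PySem.Set.ofList (PySem.Dict.mk item).keys))
        PySem.Set.empty with hK
    set allKeys : List String := PySem.List.sorted K (fun k => k) with hAK
    set merged : PySem.Dict String Int :=
      data.reverse.foldl (fun r item => r.update item) PySem.Dict.empty with hM
    have hKnodup : K.Nodup := pv_unionFold_nodup data _ List.nodup_nil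
    have hmemK : ∀ k, k ∈ K ↔ ∃ item ∈ data, k ∈ item.map Prod.fst := by
      intro k; rw [hK, pv_mem_unionFold]; simp [PySem.Set.empty]
    have hAKperm : allKeys.Perm K := PySem.List.sorted_perm K (fun k => k) false
    have hAKnodup : allKeys.Nodup := hAKperm.nodup_iff.mpr hKnodup
    have hAKlt : allKeys.Pairwise (· < ·) := by
      have hle : allKeys.Pairwise (fun a b => a ≤ b) :=
        PySem.List.sorted_pairwise K (fun k => k)
      have := List.Pairwise.and hle hAKnodup
      exact this.imp (fun ⟨h1, h2⟩ => lt_of_le_of_ne h1 h2)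
    -- every key in allKeys has a value
    have hval : ∀ k ∈ allKeys, pvFirstVal data k = some ((pvFirstVal data k).getD 0) := by
      intro k hk
      have : (pvFirstVal data k).isSome := by
        rw [pv_firstVal_isSome]
        exact (hmemK k).1 (hAKperm.mem_iff.mp hk)
      cases h : pvFirstVal data k with
      | none => rw [h] at this; simp at this
      | some v => simp
    -- A's fold is a fresh-key insert fold
    have hAfold :
        (allKeys.foldl (fun r key =>
            match pvFirstVal data key with
            | some v => r.insert key v
            | none => r) PySem.Dict.empty).items =
          allKeys.map (fun k => (k, (pvFirstVal data k).getD 0)) := by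
      have hcongr := PySem.List.foldl_congr_mem allKeys
        (fun (r : PySem.Dict String Int) key =>
            match pvFirstVal data key with
            | some v => r.insert key v
            | none => r)
        (fun (r : PySem.Dict String Int) key => r.insert key ((pvFirstVal data key).getD 0))
        PySem.Dict.empty
        (by
          intro r k hk
          obtain ⟨v, hv⟩ : ∃ v, pvFirstVal data k = some v := ⟨_, hval k hk⟩
          simp only [hv, Option.getD_some])
      rw [hcongr]
      have := PySem.Dict.items_foldl_insert_fresh allKeys (fun k => k)
        (fun k => (pvFirstVal data k).getD 0) PySem.Dict.empty
        (by intro a _; simp [PySem.Dict.contains_empty]) (by simpa using hAKnodup)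
      simpa [PySem.Dict.empty] using this
    -- B's merged dict: lookups and keys
    have hmget : ∀ k, merged.get? k = pvFirstVal data k := by
      intro k
      rw [hM, pv_get?_revFold data.reverse PySem.Dict.empty
        (fun i hi => hpre i (List.mem_reverse.mp hi)) k]
      simp [PySem.Dict.get?, PySem.Dict.empty]
    have hmnodup : merged.keys.Nodup :=
      pv_nodup_keys_revFold data.reverse PySem.Dict.empty (by simp [PySem.Dict.keys, PySem.Dict.empty])
    have hmemkeys : ∀ k, k ∈ merged.keys ↔ k ∈ K := by
      intro k
      rw [pv_mem_keys_iff_get?_ne_none, hmget, hmemK, ← pv_firstVal_isSome]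
      simp [Option.isSome_iff_ne_none]
    have hitems : merged.items = merged.keys.map (fun k => (k, (pvFirstVal data k).getD 0)) := by
      rw [PySem.Dict.items_eq_map_keys merged hmnodup 0]
      refine List.map_congr_left (fun k _ => ?_)
      rw [PySem.Dict.getD_eq_get?_getD, hmget]
    -- the sort of merged.items is exactly A's items list
    have hperm : (allKeys.map (fun k => (k, (pvFirstVal data k).getD 0))).Perm merged.items := by
      rw [hitems]
      refine List.Perm.map _ ?_
      refine (List.perm_ext_iff_of_nodup hAKnodup hmnodup).mpr (fun k => ?_)
      rw [hmemkeys, hAKperm.mem_iff]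
    have hsorted :
        PySem.List.sorted merged.items (fun kv => kv.1) =
          allKeys.map (fun k => (k, (pvFirstVal data k).getD 0)) := by
      refine PySem.List.sorted_eq_of_perm_of_pairwise_lt _ _ _ hperm ?_
      rw [List.pairwise_map]
      exact hAKlt
    exact congrArg some (hAfold.trans hsorted.symm)
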